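-- pv_equiv track=rewrite | github.com/pvliesdonk/questfoundry | src/questfoundry/agents/serialize.py | _suggest_closest
-- ===== SOURCE A (Python) =====
-- def _suggest_closest(bad_id: str, valid_ids: list[str]) -> str | None:
--     """Find the closest valid ID to a bad one using simple substring matching.
--
--     Returns the best match if one valid ID is a substring of the bad ID
--     or vice versa. Used for correction suggestions like
--     'trust_strength' → 'strength'.
--
--     Args:
--         bad_id: The invalid answer ID.
--         valid_ids: List of valid answer IDs.
--
--     Returns:
--         Best matching valid ID, or None if no close match found.
--     """
--     # Prefer exact token-boundary matches (e.g., "_strength" in "trust_strength")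
--     for vid in valid_ids:
--         if f"_{vid}" in bad_id or bad_id.endswith(vid) or bad_id.startswith(vid):
--             return vid
--     # Fall back to simple substring (valid ID appears within bad ID)
--     for vid in valid_ids:
--         if vid in bad_id:
--             return vid
--     # Check reverse (bad ID is substring of valid)
--     for vid in valid_ids:
--         if bad_id in vid:
--             return vid
--     return None
-- ===== SOURCE B (Python) =====
-- def _suggest_closest(bad_id: str, valid_ids: list[str]) -> str | None:
--     """Single pass over valid_ids keeping the first substring and
--     reverse-substring matches; token-boundary matches return immediately."""
--     sub_match = None
--     rev_match = None
--     for vid in valid_ids: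
--         if f"_{vid}" in bad_id or bad_id.endswith(vid) or bad_id.startswith(vid):
--             return vid
--         if sub_match is None and vid in bad_id:
--             sub_match = vid
--         if rev_match is None and bad_id in vid:
--             rev_match = vid
--     return sub_match if sub_match is not None else rev_match
-- ===== Notes on version B (the rewrite author's own statement) =====
-- stated objective: alternative
-- what changed: Replaced A's three sequential scans over valid_ids (token-boundary, substring, reverse-substring) by a single pass that returns a token-boundary match immediately and records the first substring and first reverse-substring matches in two variables, choosing between them after the loop.
import Mathlib
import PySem

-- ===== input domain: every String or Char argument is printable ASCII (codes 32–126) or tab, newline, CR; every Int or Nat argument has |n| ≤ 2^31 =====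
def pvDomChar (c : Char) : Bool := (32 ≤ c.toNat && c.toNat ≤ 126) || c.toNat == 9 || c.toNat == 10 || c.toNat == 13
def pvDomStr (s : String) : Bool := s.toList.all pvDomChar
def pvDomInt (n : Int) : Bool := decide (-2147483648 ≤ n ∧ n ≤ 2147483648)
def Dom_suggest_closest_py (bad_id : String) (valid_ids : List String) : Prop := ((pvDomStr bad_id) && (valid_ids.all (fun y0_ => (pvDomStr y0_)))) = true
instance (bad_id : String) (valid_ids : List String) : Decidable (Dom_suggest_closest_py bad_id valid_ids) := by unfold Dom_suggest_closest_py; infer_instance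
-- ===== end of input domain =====

-- B replaces A's three sequential scans by one pass keeping two first-seen registers; objective: alternative (single traversal).


-- ===== PORT A =====
-- 'f"_{vid}" in bad_id or bad_id.endswith(vid) or bad_id.startswith(vid)' — exact via PySem.Chars
def pvTier1 (bad_id vid : String) : Bool :=
  PySem.Chars.isIn ('_' :: vid.toList) bad_id.toList
    || PySem.Chars.endswith bad_id.toList vid.toList
    || PySem.Chars.startswith bad_id.toList vid.toList

-- first loop of A: token-boundary matches
def pvScan1 (bad_id : String) : List String → Option String
  | [] => none
  | vid :: rest => if pvTier1 bad_id vid then some vid else pvScan1 bad_id rest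

-- second loop of A: 'vid in bad_id'
def pvScan2 (bad_id : String) : List String → Option String
  | [] => none
  | vid :: rest => if PySem.Str.isIn vid bad_id then some vid else pvScan2 bad_id rest

-- third loop of A: 'bad_id in vid'
def pvScan3 (bad_id : String) : List String → Option String
  | [] => none
  | vid :: rest => if PySem.Str.isIn bad_id vid then some vid else pvScan3 bad_id rest

def suggest_closest_py (bad_id : String) (valid_ids : List String) : Option String :=
  match pvScan1 bad_id valid_ids with
  | some v => some v
  | none =>
    match pvScan2 bad_id valid_ids with
    | some v => some v
    | none => pvScan3 bad_id valid_ids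

-- ===== PORT B =====
-- the single loop of Source B, carrying the two first-seen registers
def pvAltLoop (bad_id : String) : List String → Option String → Option String → Option String
  | [], sub_match, rev_match =>
    match sub_match with
    | some s => some s
    | none => rev_match
  | vid :: rest, sub_match, rev_match =>
    if pvTier1 bad_id vid then some vid
    else
      pvAltLoop bad_id rest
        (if sub_match.isNone && PySem.Str.isIn vid bad_id then some vid else sub_match)
        (if rev_match.isNone && PySem.Str.isIn bad_id vid then some vid else rev_match)

def suggest_closest_py_alt (bad_id : String) (valid_ids : List String) : Option String :=
  pvAltLoop bad_id valid_ids none none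

-- ===== PRECONDITION & SPEC =====
def Spec_suggest_closest_py (bad_id : String) (valid_ids : List String) (out : Option String) : Prop := out = suggest_closest_py_alt bad_id valid_ids
instance (bad_id : String) (valid_ids : List String) (out : Option String) : Decidable (Spec_suggest_closest_py bad_id valid_ids out) := by unfold Spec_suggest_closest_py; infer_instance

-- ===== CLAIM (what is proved, stated in full; the proofs are below) =====
def Claim_equal_suggest_closest_py : Prop := ∀ (bad_id : String) (valid_ids : List String), Dom_suggest_closest_py bad_id valid_ids → Spec_suggest_closest_py bad_id valid_ids (suggest_closest_py bad_id valid_ids)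

-- ===== LEMMAS AND PROOFS =====

-- 'x if x is not None else y'
def pvFirstSome (a b : Option String) : Option String :=
  match a with
  | some s => some s
  | none => b

-- loop invariant: the single pass with registers equals A's three-scan cascade seeded with them
theorem pvAltLoop_eq (bad_id : String) (vs : List String) :
    ∀ (sub rev : Option String),
      pvAltLoop bad_id vs sub rev =
        pvFirstSome (pvScan1 bad_id vs)
          (pvFirstSome (pvFirstSome sub (pvScan2 bad_id vs))
            (pvFirstSome rev (pvScan3 bad_id vs))) := by
  induction vs with
  | nil =>
    intro sub rev
    cases sub <;> cases rev <;> simp [pvAltLoop, pvScan1, pvScan2, pvScan3, pvFirstSome]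
  | cons vid rest ih =>
    intro sub rev
    by_cases h1 : pvTier1 bad_id vid
    · simp [pvAltLoop, pvScan1, h1, pvFirstSome]
    · rw [pvAltLoop, if_neg h1, ih]
      have hsub : pvFirstSome (if sub.isNone && PySem.Str.isIn vid bad_id then some vid else sub)
          (pvScan2 bad_id rest) = pvFirstSome sub (pvScan2 bad_id (vid :: rest)) := by
        cases sub <;> by_cases h2 : PySem.Chars.isIn vid.toList bad_id.toList <;>
          simp [pvFirstSome, pvScan2, h2]
      have hrev : pvFirstSome (if rev.isNone && PySem.Str.isIn bad_id vid then some vid else rev)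
          (pvScan3 bad_id rest) = pvFirstSome rev (pvScan3 bad_id (vid :: rest)) := by
        cases rev <;> by_cases h3 : PySem.Chars.isIn bad_id.toList vid.toList <;>
          simp [pvFirstSome, pvScan3, h3]
      rw [hsub, hrev]
      simp [pvScan1, h1]

-- ===== VERDICT (by name: the statement is the Claim_ definition above) =====
theorem suggest_closest_py_spec : Claim_equal_suggest_closest_py := by
  intro bad_id valid_ids _
  unfold Spec_suggest_closest_py suggest_closest_py suggest_closest_py_alt
  rw [pvAltLoop_eq]
  cases pvScan1 bad_id valid_ids <;> cases h2 : pvScan2 bad_id valid_ids <;>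
    simp [pvFirstSome]
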